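-- pv_equiv track=rewrite | github.com/alaalsalam/aau_university | aau_university/utils/seed_home.py | _normalize_values
-- ===== SOURCE A (Python) =====
-- def _normalize_values(payload: dict, allowed_fields: set[str]) -> dict:
--     values = {key: value for key, value in payload.items() if key in allowed_fields}
--
--     if "event_title" in allowed_fields and "event_title" not in values:
--         values["event_title"] = payload.get("event_title") or payload.get("title") or payload.get("title_en")
--     if "event_date" in allowed_fields and "event_date" not in values:
--         values["event_date"] = payload.get("event_date") or payload.get("date") or payload.get("publish_date")
--     if "location" in allowed_fields and "location" not in values:
--         values["location"] = payload.get("location") or payload.get("location_en") or payload.get("location_ar")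
--
--     if "title" in allowed_fields and "title" not in values:
--         values["title"] = payload.get("title") or payload.get("event_title") or payload.get("question")
--     if "content" in allowed_fields and "content" not in values:
--         values["content"] = payload.get("content") or payload.get("description") or payload.get("answer")
--     if "publish_date" in allowed_fields and "publish_date" not in values:
--         values["publish_date"] = payload.get("publish_date") or payload.get("date")
--     if "college_name" in allowed_fields and "college_name" not in values:
--         values["college_name"] = payload.get("college_name") or payload.get("name") or payload.get("name_en")
--
--     return {key: value for key, value in values.items() if value not in (None, "")}
-- ===== SOURCE B (Python) =====
-- # Inverted index: each source key maps to the (target, priority) pairs it can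
-- # serve; one scan over the payload keeps, per target, the truthy value of
-- # smallest priority, so no payload.get fallback chains are ever evaluated.
-- CONTRIB = {
--     "event_title": (("event_title", 0), ("title", 1)),
--     "title": (("event_title", 1), ("title", 0)),
--     "title_en": (("event_title", 2),),
--     "event_date": (("event_date", 0),),
--     "date": (("event_date", 1), ("publish_date", 1)),
--     "publish_date": (("event_date", 2), ("publish_date", 0)),
--     "location": (("location", 0),),
--     "location_en": (("location", 1),),
--     "location_ar": (("location", 2),),
--     "question": (("title", 2),),
--     "content": (("content", 0),),
--     "description": (("content", 1),),
--     "answer": (("content", 2),),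
--     "college_name": (("college_name", 0),),
--     "name": (("college_name", 1),),
--     "name_en": (("college_name", 2),),
-- }
--
-- ORDER = ("event_title", "event_date", "location", "title", "content", "publish_date", "college_name")
--
--
-- def _normalize_values(payload: dict, allowed_fields: set[str]) -> dict:
--     best = {}
--     for key, value in payload.items():
--         if value not in (None, ""):
--             for target, prio in CONTRIB.get(key, ()):
--                 cur = best.get(target)
--                 if cur is None or prio < cur[0]:
--                     best[target] = (prio, value)
--     out = {k: v for k, v in payload.items() if k in allowed_fields and v not in (None, "")}
--     for field in ORDER:
--         if field in allowed_fields and field not in payload and field in best: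
--             out[field] = best[field][1]
--     return out
-- ===== Notes on version B (the rewrite author's own statement) =====
-- stated objective: alternative
-- what changed: Replaces A's seven hand-written per-field fallback chains of payload.get calls by an inverted index: a CONTRIB table maps each source key to the (target field, priority) pairs it can serve, a single scan of the payload keeps per target the truthy value of smallest priority, and the fallback loop just reads that table; Pre_ excludes duplicate-key association lists, which cannot arise from A's dict payload.
import Mathlib
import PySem

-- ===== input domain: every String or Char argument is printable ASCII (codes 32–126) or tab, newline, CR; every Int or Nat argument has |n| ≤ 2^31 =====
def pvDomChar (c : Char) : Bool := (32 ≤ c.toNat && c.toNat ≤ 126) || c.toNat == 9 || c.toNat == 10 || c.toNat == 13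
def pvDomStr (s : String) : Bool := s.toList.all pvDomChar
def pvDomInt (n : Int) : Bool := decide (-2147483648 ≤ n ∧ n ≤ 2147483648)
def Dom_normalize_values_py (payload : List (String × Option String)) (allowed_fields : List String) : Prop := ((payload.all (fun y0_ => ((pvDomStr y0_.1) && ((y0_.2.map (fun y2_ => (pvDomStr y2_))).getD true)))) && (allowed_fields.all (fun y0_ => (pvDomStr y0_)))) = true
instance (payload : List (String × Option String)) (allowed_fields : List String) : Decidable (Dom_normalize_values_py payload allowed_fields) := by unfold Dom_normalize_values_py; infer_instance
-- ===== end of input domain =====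

-- B replaces A's seven per-field fallback chains by an inverted index: one scan of the
-- payload keeps, per target field, the truthy value of smallest alias priority
-- (objective: alternative algorithm / data structure; same asymptotic cost).

-- ===== PORT A =====
-- payload.get(k): missing key and a stored None both yield None
def pvGet (payload : List (String × Option String)) (k : String) : Option String :=
  match payload.find? (fun kv => kv.1 == k) with
  | some kv => kv.2
  | none => none

-- Python truthiness of an Optional[str]
def pvTruthy (v : Option String) : Bool :=
  match v with
  | some s => s != ""
  | none => false

-- Python's `x or y` on Optional[str]
def pvOr (x y : Option String) : Option String := if pvTruthy x then x else y

def normalize_values_py (payload : List (String × Option String)) (allowed_fields : List String) : List (String × String) :=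
  let values := payload.filter (fun kv => allowed_fields.contains kv.1)
  let values := if allowed_fields.contains "event_title" && !(values.any (fun kv => kv.1 == "event_title")) then
      values ++ [("event_title", pvOr (pvOr (pvGet payload "event_title") (pvGet payload "title")) (pvGet payload "title_en"))] else values
  let values := if allowed_fields.contains "event_date" && !(values.any (fun kv => kv.1 == "event_date")) then
      values ++ [("event_date", pvOr (pvOr (pvGet payload "event_date") (pvGet payload "date")) (pvGet payload "publish_date"))] else values
  let values := if allowed_fields.contains "location" && !(values.any (fun kv => kv.1 == "location")) then
      values ++ [("location", pvOr (pvOr (pvGet payload "location") (pvGet payload "location_en")) (pvGet payload "location_ar"))] else values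
  let values := if allowed_fields.contains "title" && !(values.any (fun kv => kv.1 == "title")) then
      values ++ [("title", pvOr (pvOr (pvGet payload "title") (pvGet payload "event_title")) (pvGet payload "question"))] else values
  let values := if allowed_fields.contains "content" && !(values.any (fun kv => kv.1 == "content")) then
      values ++ [("content", pvOr (pvOr (pvGet payload "content") (pvGet payload "description")) (pvGet payload "answer"))] else values
  let values := if allowed_fields.contains "publish_date" && !(values.any (fun kv => kv.1 == "publish_date")) then
      values ++ [("publish_date", pvOr (pvGet payload "publish_date") (pvGet payload "date"))] else values
  let values := if allowed_fields.contains "college_name" && !(values.any (fun kv => kv.1 == "college_name")) then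
      values ++ [("college_name", pvOr (pvOr (pvGet payload "college_name") (pvGet payload "name")) (pvGet payload "name_en"))] else values
  values.filterMap (fun kv => match kv.2 with
    | some s => if s != "" then some (kv.1, s) else none
    | none => none)

-- ===== PORT B =====
-- the CONTRIB table: source key -> (target field, priority) pairs it can serve
def pvContrib : List (String × List (String × Nat)) :=
  [("event_title", [("event_title", 0), ("title", 1)]),
   ("title", [("event_title", 1), ("title", 0)]),
   ("title_en", [("event_title", 2)]),
   ("event_date", [("event_date", 0)]),
   ("date", [("event_date", 1), ("publish_date", 1)]),
   ("publish_date", [("event_date", 2), ("publish_date", 0)]),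
   ("location", [("location", 0)]),
   ("location_en", [("location", 1)]),
   ("location_ar", [("location", 2)]),
   ("question", [("title", 2)]),
   ("content", [("content", 0)]),
   ("description", [("content", 1)]),
   ("answer", [("content", 2)]),
   ("college_name", [("college_name", 0)]),
   ("name", [("college_name", 1)]),
   ("name_en", [("college_name", 2)])]

def pvOrder : List String :=
  ["event_title", "event_date", "location", "title", "content", "publish_date", "college_name"]

-- CONTRIB.get(key, ())
def pvContribGet (k : String) : List (String × Nat) :=
  match pvContrib.find? (fun e => e.1 == k) with
  | some e => e.2
  | none => []

-- `cur = best.get(target); if cur is None or prio < cur[0]: best[target] = (prio, value)`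
def pvUpd (best : PySem.Dict String (Nat × String)) (s : String) (tp : String × Nat) :
    PySem.Dict String (Nat × String) :=
  match best.get? tp.1 with
  | none => best.insert tp.1 (tp.2, s)
  | some cur => if tp.2 < cur.1 then best.insert tp.1 (tp.2, s) else best

-- inner `for target, prio in CONTRIB.get(key, ())` loop
def pvStepItem (best : PySem.Dict String (Nat × String)) (k s : String) :
    PySem.Dict String (Nat × String) :=
  (pvContribGet k).foldl (fun b tp => pvUpd b s tp) best

-- outer `for key, value in payload.items()` loop building `best`
def pvComputeBest (payload : List (String × Option String)) : PySem.Dict String (Nat × String) :=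
  payload.foldl (fun best kv =>
    match kv.2 with
    | some s => if s != "" then pvStepItem best kv.1 s else best
    | none => best) PySem.Dict.empty

def normalize_values_py_alt (payload : List (String × Option String)) (allowed_fields : List String) : List (String × String) :=
  let best := pvComputeBest payload
  let out := payload.filterMap (fun kv =>
    match kv.2 with
    | some s => if allowed_fields.contains kv.1 && s != "" then some (kv.1, s) else none
    | none => none)
  pvOrder.foldl (fun out f =>
    if allowed_fields.contains f && !(payload.any (fun kv => kv.1 == f)) then
      match best.get? f with
      | some pv => out ++ [(f, pv.2)]
      | none => out
    else out) out

-- ===== PRECONDITION & SPEC =====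
-- Pre_ excludes association lists with duplicate keys: the Python payload is a dict,
-- whose keys are necessarily distinct, so no Python input is excluded.
def Pre_normalize_values_py (payload : List (String × Option String)) (allowed_fields : List String) : Prop :=
  (payload.map Prod.fst).Nodup
instance (payload : List (String × Option String)) (allowed_fields : List String) : Decidable (Pre_normalize_values_py payload allowed_fields) := by unfold Pre_normalize_values_py; infer_instance

def pvWitness_normalize_values_py : (List (String × Option String)) × List String :=
  ([("title", some "T"), ("note", none)], ["event_title", "title"])

def Spec_normalize_values_py (payload : List (String × Option String)) (allowed_fields : List String) (out : List (String × String)) : Prop := out = normalize_values_py_alt payload allowed_fields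
instance (payload : List (String × Option String)) (allowed_fields : List String) (out : List (String × String)) : Decidable (Spec_normalize_values_py payload allowed_fields out) := by unfold Spec_normalize_values_py; infer_instance

-- ===== CLAIM (what is proved, stated in full; the proofs are below) =====
def Claim_equal_normalize_values_py : Prop := ∀ (payload : List (String × Option String)) (allowed_fields : List String), Dom_normalize_values_py payload allowed_fields → Pre_normalize_values_py payload allowed_fields → Spec_normalize_values_py payload allowed_fields (normalize_values_py payload allowed_fields)

-- ===== LEMMAS AND PROOFS =====

-- truthy part of an Optional[str]: some s for truthy s, none otherwise
def truthyVal : Option String → Option String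
  | some s => if s != "" then some s else none
  | none => none

-- the alias table of A, in A's branch order
def pvAliases : List (String × List String) :=
  [("event_title", ["event_title", "title", "title_en"]),
   ("event_date", ["event_date", "date", "publish_date"]),
   ("location", ["location", "location_en", "location_ar"]),
   ("title", ["title", "event_title", "question"]),
   ("content", ["content", "description", "answer"]),
   ("publish_date", ["publish_date", "date"]),
   ("college_name", ["college_name", "name", "name_en"])]

-- the final `{k: v for k, v in values.items() if v not in (None, "")}` filter
def pvFin (vs : List (String × Option String)) : List (String × String) :=
  vs.filterMap (fun kv => match kv.2 with
    | some s => if s != "" then some (kv.1, s) else none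
    | none => none)

-- one of A's fallback branches, abstracted over the field and the computed fallback value
def pvStepA (al : List String) (f : String) (w : Option String)
    (vs : List (String × Option String)) : List (String × Option String) :=
  if al.contains f && !(vs.any (fun kv => kv.1 == f)) then vs ++ [(f, w)] else vs

-- the `get k1 or get k2 or …` chain as a fold
def pvChain (p : List (String × Option String)) (ks : List String) : Option String :=
  ks.foldl (fun acc k => pvOr acc (pvGet p k)) none

-- canonical fallback step: append the field iff allowed, absent and some alias is truthy
def pvStepC (p : List (String × Option String)) (al : List String)
    (out : List (String × String)) (fk : String × List String) : List (String × String) :=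
  if al.contains fk.1 && !(p.any (fun kv => kv.1 == fk.1)) then
    match truthyVal (pvChain p fk.2) with
    | some s => out ++ [(fk.1, s)]
    | none => out
  else out

def pvBase (p : List (String × Option String)) (al : List String) : List (String × String) :=
  p.filterMap (fun kv =>
    match kv.2 with
    | some s => if al.contains kv.1 && s != "" then some (kv.1, s) else none
    | none => none)

-- min-by-priority with left preference on ties (the update rule of B's scan)
def pvMerge : Option (Nat × String) → Option (Nat × String) → Option (Nat × String)
  | none, b => b
  | some a, none => some a
  | some a, some b => if b.1 < a.1 then some b else some a

-- first index of k in L, counting from n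
def pvIdx? (k : String) : List String → Nat → Option Nat
  | [], _ => none
  | a :: rest, n => if a = k then some n else pvIdx? k rest (n + 1)

-- first (index, value) with g truthy, counting from n
def pvFW (g : String → Option String) : List String → Nat → Option (Nat × String)
  | [], _ => none
  | a :: rest, n =>
    match g a with
    | some s => some (n, s)
    | none => pvFW g rest (n + 1)

def pvContribIdx (k f : String) : Option Nat :=
  ((pvContribGet k).find? (fun tp => tp.1 == f)).map (·.2)

-- contribution of one payload item (key k, truthy part w) to field f
def pvCOpt (k : String) (w : Option String) (f : String) : Option (Nat × String) :=
  match w with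
  | some s => (pvContribIdx k f).map (fun i => (i, s))
  | none => none

-- B's best[f] as a direct fold over the payload
def pvBestF (p : List (String × Option String)) (f : String) : Option (Nat × String) :=
  p.foldl (fun acc kv => pvMerge acc (pvCOpt kv.1 (truthyVal kv.2) f)) none

def pvSourceKeys : List String := pvContrib.map Prod.fst

-- ---------- A-side: A = foldl pvStepC over pvAliases from pvBase ----------

lemma pvOr_none (x : Option String) : pvOr none x = x := rfl

lemma pvFoldOr_truthy (p : List (String × Option String)) (ks : List String) (acc : Option String)
    (h : pvTruthy acc = true) :
    ks.foldl (fun a k => pvOr a (pvGet p k)) acc = acc := by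
  induction ks with
  | nil => rfl
  | cons k rest ih => simpa [List.foldl_cons, pvOr, h] using ih

lemma pvFin_append (xs ys : List (String × Option String)) :
    pvFin (xs ++ ys) = pvFin xs ++ pvFin ys := by
  simp [pvFin]

lemma any_pvStepA (al : List String)
    (f : String) (w : Option String) (vs : List (String × Option String)) (f' : String)
    (h : (f == f') = false) :
    (pvStepA al f w vs).any (fun kv => kv.1 == f') = vs.any (fun kv => kv.1 == f') := by
  unfold pvStepA; split <;> simp [h]

lemma any_filter_contains (p : List (String × Option String)) (al : List String) (f : String)
    (h : al.contains f = true) :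
    (p.filter (fun kv => al.contains kv.1)).any (fun kv => kv.1 == f) = p.any (fun kv => kv.1 == f) := by
  induction p with
  | nil => rfl
  | cons kv rest ih =>
    rcases kv with ⟨k, v⟩
    by_cases hk : k = f
    · subst hk
      rw [List.filter_cons_of_pos (by simpa using h)]
      simp [List.any_cons]
    · have hk' : (k == f) = false := by simp [hk]
      by_cases hm : k ∈ al <;> simpa [List.filter_cons, hm, hk'] using ih

lemma pvFin_filter (p : List (String × Option String)) (al : List String) :
    pvFin (p.filter (fun kv => al.contains kv.1)) = pvBase p al := by
  induction p with
  | nil => rfl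
  | cons kv rest ih =>
    rcases kv with ⟨k, v⟩
    by_cases hm : k ∈ al
    · cases v with
      | none => simpa [List.filter_cons, List.filterMap_cons, hm, pvFin, pvBase] using ih
      | some s =>
        by_cases hs : s = "" <;>
          simpa [List.filter_cons, List.filterMap_cons, hm, hs, pvFin, pvBase] using ih
    · cases v with
      | none => simpa [List.filter_cons, List.filterMap_cons, hm, pvFin, pvBase] using ih
      | some s => simpa [List.filter_cons, List.filterMap_cons, hm, pvFin, pvBase] using ih

lemma pvFold_eq (p : List (String × Option String)) (al : List String) :
    ∀ (L : List (String × List String)) (vs : List (String × Option String)),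
    List.Pairwise (fun a b => (a.1 == b.1) = false) L →
    (∀ fk ∈ L, al.contains fk.1 = true →
      vs.any (fun kv => kv.1 == fk.1) = p.any (fun kv => kv.1 == fk.1)) →
    pvFin (L.foldl (fun vs fk => pvStepA al fk.1 (pvChain p fk.2) vs) vs) =
    L.foldl (pvStepC p al) (pvFin vs) := by
  intro L
  induction L with
  | nil => intro vs _ _; rfl
  | cons fk rest ih =>
    intro vs hpw hmem
    rcases List.pairwise_cons.mp hpw with ⟨hhd, hrest⟩
    have h1 : pvFin (pvStepA al fk.1 (pvChain p fk.2) vs) = pvStepC p al (pvFin vs) fk := by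
      unfold pvStepA pvStepC
      by_cases hc : al.contains fk.1 = true
      · rw [hmem fk (by simp) hc]
        by_cases hp : p.any (fun kv => kv.1 == fk.1) = true
        · simp [hc, hp]
        · simp only [Bool.not_eq_true] at hp
          have hm : fk.1 ∈ al := by simpa using hc
          have hcond : (al.contains fk.1 && !p.any (fun kv => kv.1 == fk.1)) = true := by
            simp [hm, hp]
          rw [if_pos hcond, if_pos hcond, pvFin_append]
          cases hch : pvChain p fk.2 with
          | none => simp [pvFin, truthyVal]
          | some s => by_cases hs : s = "" <;> simp [pvFin, truthyVal, hs]
      · simp only [Bool.not_eq_true] at hc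
        have hm : fk.1 ∉ al := by simpa using hc
        rw [if_neg (by simp [hm]), if_neg (by simp [hm])]
    rw [List.foldl_cons, List.foldl_cons]
    have hmem' : ∀ fk' ∈ rest, al.contains fk'.1 = true →
        ((pvStepA al fk.1 (pvChain p fk.2) vs).any fun kv => kv.1 == fk'.1) =
          p.any fun kv => kv.1 == fk'.1 := by
      intro fk' h' hc'
      rw [any_pvStepA al fk.1 (pvChain p fk.2) vs fk'.1 (hhd fk' h')]
      exact hmem fk' (List.mem_cons_of_mem _ h') hc'
    rw [ih _ hrest hmem', h1]

lemma A_canon (p : List (String × Option String)) (al : List String) :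
    normalize_values_py p al = pvAliases.foldl (pvStepC p al) (pvBase p al) := by
  have hA : normalize_values_py p al =
      pvFin (pvAliases.foldl (fun vs fk => pvStepA al fk.1 (pvChain p fk.2) vs)
        (p.filter (fun kv => al.contains kv.1))) := by
    simp only [normalize_values_py, pvAliases, pvStepA, pvChain, pvFin, List.foldl_cons,
      List.foldl_nil, pvOr_none]
  rw [hA, pvFold_eq p al pvAliases _ (by decide)
    (fun fk _ hc => any_filter_contains p al fk.1 hc), pvFin_filter]

-- ---------- B-side: B = foldl pvStepC over pvAliases from pvBase ----------

lemma pvMerge_none_right (a : Option (Nat × String)) : pvMerge a none = a := by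
  cases a <;> rfl

lemma pvMerge_assoc (a b c : Option (Nat × String)) :
    pvMerge (pvMerge a b) c = pvMerge a (pvMerge b c) := by
  rcases a with _ | a <;> rcases b with _ | b <;> rcases c with _ | c <;>
    simp only [pvMerge] <;> split_ifs <;> simp only [pvMerge] <;> split_ifs <;>
    first | rfl | omega

lemma contribGet_nodup (k : String) : ((pvContribGet k).map Prod.fst).Nodup := by
  unfold pvContribGet
  cases h : pvContrib.find? (fun e => e.1 == k) with
  | none => simp
  | some e =>
    have hm := List.mem_of_find?_eq_some h
    have hall : ∀ e ∈ pvContrib, ((e.2.map Prod.fst).Nodup) := by decide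
    exact hall e hm

lemma inner_fold_get (f : String) :
    ∀ (cs : List (String × Nat)), (cs.map Prod.fst).Nodup →
    ∀ (best : PySem.Dict String (Nat × String)) (s : String),
    (cs.foldl (fun b tp => pvUpd b s tp) best).get? f =
      pvMerge (best.get? f) ((cs.find? (fun tp => tp.1 == f)).map (fun tp => (tp.2, s))) := by
  intro cs
  induction cs with
  | nil => intro _ best s; simp [pvMerge_none_right]
  | cons tp cs ih =>
    intro hnd best s
    simp only [List.map_cons] at hnd
    rcases List.nodup_cons.mp hnd with ⟨htp, hcs⟩
    rw [List.foldl_cons]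
    by_cases hf : tp.1 = f
    · have hfind : (tp :: cs).find? (fun q => q.1 == f) = some tp := by
        simp [hf]
      have hcsf : cs.find? (fun q => q.1 == f) = none := by
        apply List.find?_eq_none.mpr
        intro q hq
        simp only [beq_iff_eq]
        intro he
        exact htp (List.mem_map.mpr ⟨q, hq, by rw [he, hf]⟩)
      rw [ih hcs (pvUpd best s tp) s, hcsf, hfind]
      simp only [Option.map_none, pvMerge_none_right, Option.map_some]
      unfold pvUpd
      cases hb : best.get? tp.1 with
      | none =>
        rw [hf] at hb
        rw [hf, hb]
        simp [PySem.Dict.get?_insert_self, pvMerge]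
      | some cur =>
        rw [hf] at hb
        rw [hf, hb]
        dsimp only
        by_cases hlt : tp.2 < cur.1
        · rw [if_pos hlt]
          simp [PySem.Dict.get?_insert_self, pvMerge, hlt]
        · rw [if_neg hlt]
          rw [hb]
          simp [pvMerge, hlt]
    · have hfind : (tp :: cs).find? (fun q => q.1 == f) = cs.find? (fun q => q.1 == f) := by
        simp [hf]
      have hne : f ≠ tp.1 := fun h => hf h.symm
      have hupd : (pvUpd best s tp).get? f = best.get? f := by
        unfold pvUpd
        cases best.get? tp.1 with
        | none => exact PySem.Dict.get?_insert_of_ne _ _ hne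
        | some cur =>
          dsimp only
          by_cases hlt : tp.2 < cur.1
          · rw [if_pos hlt]; exact PySem.Dict.get?_insert_of_ne _ _ hne
          · rw [if_neg hlt]
      rw [ih hcs _ s, hupd, hfind]

lemma computeBest_get (p : List (String × Option String)) (f : String) :
    (pvComputeBest p).get? f = pvBestF p f := by
  have gen : ∀ (q : List (String × Option String)) (best : PySem.Dict String (Nat × String)),
      (q.foldl (fun best kv =>
        match kv.2 with
        | some s => if s != "" then pvStepItem best kv.1 s else best
        | none => best) best).get? f
      = q.foldl (fun acc kv => pvMerge acc (pvCOpt kv.1 (truthyVal kv.2) f)) (best.get? f) := by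
    intro q
    induction q with
    | nil => intro best; rfl
    | cons kv rest ih =>
      intro best
      rw [List.foldl_cons, List.foldl_cons]
      cases hv : kv.2 with
      | none =>
        dsimp only
        rw [ih best]
        simp [truthyVal, pvCOpt, pvMerge_none_right]
      | some s =>
        dsimp only
        by_cases hs : s = ""
        · subst hs
          simp only [bne_self_eq_false, Bool.false_eq_true, if_false]
          rw [ih best]
          simp [truthyVal, pvCOpt, pvMerge_none_right]
        · have hbne : (s != "") = true := by simp [hs]
          rw [if_pos hbne]
          rw [ih (pvStepItem best kv.1 s)]
          unfold pvStepItem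
          rw [inner_fold_get f (pvContribGet kv.1) (contribGet_nodup kv.1) best s]
          have hco : pvCOpt kv.1 (truthyVal (some s)) f
              = (((pvContribGet kv.1).find? (fun tp => tp.1 == f)).map (fun tp => (tp.2, s))) := by
            simp only [pvCOpt, truthyVal, hbne, if_pos, pvContribIdx, Option.map_map]
            congr 1
          rw [hco]
  unfold pvComputeBest pvBestF
  rw [gen]
  simp

lemma pvFW_bound (g : String → Option String) :
    ∀ (L : List String) (n i : Nat) (s : String), pvFW g L n = some (i, s) → n ≤ i := by
  intro L
  induction L with
  | nil => intro n i s h; simp [pvFW] at h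
  | cons a rest ih =>
    intro n i s h
    simp only [pvFW] at h
    cases hg : g a with
    | some t => rw [hg] at h; simp at h; omega
    | none => rw [hg] at h; exact Nat.le_of_succ_le (ih (n + 1) i s h)

lemma pvIdx?_bound (k : String) :
    ∀ (L : List String) (n i : Nat), pvIdx? k L n = some i → n ≤ i := by
  intro L
  induction L with
  | nil => intro n i h; simp [pvIdx?] at h
  | cons a rest ih =>
    intro n i h
    simp only [pvIdx?] at h
    split at h
    · simp at h; omega
    · exact Nat.le_of_succ_le (ih (n + 1) i h)

lemma pvFW_congr (g g' : String → Option String) :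
    ∀ (L : List String) (n : Nat), (∀ a ∈ L, g a = g' a) → pvFW g L n = pvFW g' L n := by
  intro L
  induction L with
  | nil => intro n _; rfl
  | cons a rest ih =>
    intro n h
    simp only [pvFW, h a (by simp)]
    cases g' a with
    | some s => rfl
    | none => exact ih (n + 1) (fun x hx => h x (by simp [hx]))

lemma fw_update (k : String) (w : Option String) :
    ∀ (L : List String) (n : Nat) (g : String → Option String), L.Nodup → g k = none →
    pvMerge (match w with
             | some s => (pvIdx? k L n).map (fun i => (i, s))
             | none => none) (pvFW g L n)
      = pvFW (fun a => if a = k then w else g a) L n := by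
  intro L
  induction L with
  | nil =>
    intro n g _ _
    cases w <;> simp [pvIdx?, pvFW, pvMerge]
  | cons a rest ih =>
    intro n g hnd hgk
    rcases List.nodup_cons.mp hnd with ⟨hka, hrest⟩
    by_cases hak : a = k
    · subst hak
      have hfw : pvFW g (a :: rest) n = pvFW g rest (n + 1) := by simp [pvFW, hgk]
      cases w with
      | some s =>
        dsimp only
        have hidx : (pvIdx? a (a :: rest) n).map (fun i => (i, s)) = some (n, s) := by
          simp [pvIdx?]
        rw [hidx, hfw]
        have hg' : pvFW (fun x => if x = a then some s else g x) (a :: rest) n = some (n, s) := by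
          simp [pvFW]
        rw [hg']
        cases hfr : pvFW g rest (n + 1) with
        | none => rfl
        | some it =>
          have hb := pvFW_bound g rest (n + 1) it.1 it.2 (by rw [hfr])
          simp only [pvMerge]
          rw [if_neg (by omega)]
      | none =>
        dsimp only
        rw [hfw]
        have hstep : pvFW (fun x => if x = a then none else g x) (a :: rest) n
            = pvFW (fun x => if x = a then none else g x) rest (n + 1) := by simp [pvFW]
        rw [hstep]
        show pvFW g rest (n + 1) = _
        apply pvFW_congr
        intro x hx
        have hxa : ¬ x = a := fun h => hka (h ▸ hx)
        simp [hxa]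
    · have hidx : pvIdx? k (a :: rest) n = pvIdx? k rest (n + 1) := by
        simp [pvIdx?, hak]
      cases hga : g a with
      | some s0 =>
        have h1 : pvFW g (a :: rest) n = some (n, s0) := by simp [pvFW, hga]
        have h2 : pvFW (fun x => if x = k then w else g x) (a :: rest) n = some (n, s0) := by
          simp [pvFW, hak, hga]
        rw [h1, h2]
        cases w with
        | none => rfl
        | some s =>
          dsimp only
          rw [hidx]
          cases hix : pvIdx? k rest (n + 1) with
          | none => rfl
          | some i =>
            have hb := pvIdx?_bound k rest (n + 1) i hix
            simp only [Option.map_some, pvMerge]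
            rw [if_pos (by omega)]
      | none =>
        have h1 : pvFW g (a :: rest) n = pvFW g rest (n + 1) := by simp [pvFW, hga]
        have h2 : pvFW (fun x => if x = k then w else g x) (a :: rest) n
            = pvFW (fun x => if x = k then w else g x) rest (n + 1) := by
          simp [pvFW, hak, hga]
        rw [h1, h2, hidx]
        exact ih (n + 1) g hrest hgk

lemma foldl_merge (f : String) :
    ∀ (p : List (String × Option String)) (acc : Option (Nat × String)),
    p.foldl (fun a kv => pvMerge a (pvCOpt kv.1 (truthyVal kv.2) f)) acc
      = pvMerge acc (pvBestF p f) := by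
  intro p
  induction p with
  | nil => intro acc; simp [pvBestF, pvMerge_none_right]
  | cons kv rest ih =>
    intro acc
    have hsplit : pvBestF (kv :: rest) f
        = pvMerge (pvCOpt kv.1 (truthyVal kv.2) f) (pvBestF rest f) := by
      unfold pvBestF
      rw [List.foldl_cons, ih]
      rfl
    rw [List.foldl_cons, ih, pvMerge_assoc, hsplit]

lemma bestF_merge (f : String) (kv : String × Option String) (rest : List (String × Option String)) :
    pvBestF (kv :: rest) f = pvMerge (pvCOpt kv.1 (truthyVal kv.2) f) (pvBestF rest f) := by
  unfold pvBestF
  rw [List.foldl_cons, foldl_merge]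
  rfl

lemma pvGet_eq_none_of_not_mem (p : List (String × Option String)) (k : String)
    (h : k ∉ p.map Prod.fst) : pvGet p k = none := by
  unfold pvGet
  rw [List.find?_eq_none.mpr]
  intro kv hm
  simp only [beq_iff_eq]
  intro he
  exact h (List.mem_map.mpr ⟨kv, hm, he⟩)

lemma bestF_eq_fw (f : String) (L : List String) (hL : L.Nodup)
    (hIdx : ∀ k, pvContribIdx k f = pvIdx? k L 0) :
    ∀ p : List (String × Option String), (p.map Prod.fst).Nodup →
    pvBestF p f = pvFW (fun a => truthyVal (pvGet p a)) L 0 := by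
  intro p
  induction p with
  | nil =>
    intro _
    have hnone : ∀ (M : List String) (n : Nat), pvFW (fun a => truthyVal (pvGet [] a)) M n = none := by
      intro M
      induction M with
      | nil => intro n; rfl
      | cons a rest ih2 =>
        intro n
        simp only [pvFW, pvGet, List.find?_nil, truthyVal]
        exact ih2 (n + 1)
    rw [hnone L 0]
    rfl
  | cons kv rest ih =>
    intro hnd
    simp only [List.map_cons] at hnd
    rcases List.nodup_cons.mp hnd with ⟨hk, hrest⟩
    rw [bestF_merge, ih hrest]
    have hgk : truthyVal (pvGet rest kv.1) = none := by
      rw [pvGet_eq_none_of_not_mem rest kv.1 hk]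
      rfl
    have hc : pvCOpt kv.1 (truthyVal kv.2) f
        = (match truthyVal kv.2 with
           | some s => (pvIdx? kv.1 L 0).map (fun i => (i, s))
           | none => none) := by
      cases truthyVal kv.2 with
      | none => rfl
      | some s => simp [pvCOpt, hIdx kv.1]
    rw [hc, fw_update kv.1 (truthyVal kv.2) L 0 _ hL hgk]
    apply pvFW_congr
    intro a _
    by_cases hak : a = kv.1
    · subst hak
      simp [pvGet]
    · have hne : ¬ kv.1 = a := fun h => hak h.symm
      simp [pvGet, hne, hak]

lemma hIdx_of (f : String) (L : List String)
    (h1 : ∀ k ∈ pvSourceKeys, pvContribIdx k f = pvIdx? k L 0)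
    (h2 : ∀ a ∈ L, a ∈ pvSourceKeys) :
    ∀ k, pvContribIdx k f = pvIdx? k L 0 := by
  intro k
  by_cases hk : k ∈ pvSourceKeys
  · exact h1 k hk
  · have hget : pvContribGet k = [] := by
      unfold pvContribGet
      rw [List.find?_eq_none.mpr]
      intro e he
      simp only [beq_iff_eq]
      intro heq
      exact hk (List.mem_map.mpr ⟨e, he, heq⟩)
    have hnotin : k ∉ L := fun hm => hk (h2 k hm)
    have hidxnone : ∀ (M : List String) (n : Nat), k ∉ M → pvIdx? k M n = none := by
      intro M
      induction M with
      | nil => intro n _; rfl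
      | cons a rest ih2 =>
        intro n hm
        simp only [pvIdx?]
        rw [if_neg (fun h => hm (by rw [← h]; exact List.mem_cons_self)),
          ih2 (n + 1) (fun h => hm (List.mem_cons_of_mem _ h))]
    rw [hidxnone L 0 hnotin]
    simp [pvContribIdx, hget]

lemma fw_snd (g : String → Option String) :
    ∀ (L : List String) (n : Nat), (pvFW g L n).map Prod.snd = L.findSome? g := by
  intro L
  induction L with
  | nil => intro n; rfl
  | cons a rest ih =>
    intro n
    simp only [pvFW, List.findSome?_cons]
    cases g a with
    | some s => rfl
    | none => exact ih (n + 1)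

lemma chain_truthy (p : List (String × Option String)) :
    ∀ (L : List String) (acc : Option String), pvTruthy acc = false →
    truthyVal (L.foldl (fun a k => pvOr a (pvGet p k)) acc)
      = L.findSome? (fun a => truthyVal (pvGet p a)) := by
  intro L
  induction L with
  | nil =>
    intro acc h
    cases acc with
    | none => rfl
    | some s =>
      simp only [pvTruthy, bne_eq_false_iff_eq] at h
      simp [truthyVal, h]
  | cons a rest ih =>
    intro acc h
    rw [List.foldl_cons]
    have hacc : pvOr acc (pvGet p a) = pvGet p a := by simp [pvOr, h]
    rw [hacc, List.findSome?_cons]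
    cases ht : pvTruthy (pvGet p a) with
    | true =>
      rw [pvFoldOr_truthy p rest _ ht]
      cases hv : pvGet p a with
      | none => rw [hv] at ht; simp [pvTruthy] at ht
      | some s =>
        rw [hv] at ht
        simp only [pvTruthy] at ht
        simp [truthyVal, ht]
    | false =>
      have hnone : truthyVal (pvGet p a) = none := by
        cases hv : pvGet p a with
        | none => rfl
        | some s =>
          rw [hv] at ht
          simp only [pvTruthy, bne_eq_false_iff_eq] at ht
          simp [truthyVal, ht]
      rw [ih _ ht, hnone]

lemma B_canon (p : List (String × Option String)) (al : List String)
    (hnd : (p.map Prod.fst).Nodup) :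
    normalize_values_py_alt p al = pvAliases.foldl (pvStepC p al) (pvBase p al) := by
  simp only [normalize_values_py_alt]
  have hord : pvOrder = pvAliases.map Prod.fst := by rfl
  rw [hord, List.foldl_map]
  unfold pvBase
  apply PySem.List.foldl_congr_mem
  intro out fk hfk
  have hNd : ∀ fk ∈ pvAliases, (fk.2 : List String).Nodup := by decide
  have hIdxAll : ∀ fk ∈ pvAliases, ∀ k ∈ pvSourceKeys, pvContribIdx k fk.1 = pvIdx? k fk.2 0 := by
    decide
  have hSub : ∀ fk ∈ pvAliases, ∀ a ∈ fk.2, a ∈ pvSourceKeys := by decide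
  have hsnd : ((pvComputeBest p).get? fk.1).map Prod.snd = truthyVal (pvChain p fk.2) := by
    rw [computeBest_get,
      bestF_eq_fw fk.1 fk.2 (hNd fk hfk) (hIdx_of fk.1 fk.2 (hIdxAll fk hfk) (hSub fk hfk)) p hnd,
      fw_snd]
    unfold pvChain
    rw [chain_truthy p fk.2 none rfl]
  unfold pvStepC
  by_cases hcond : (al.contains fk.1 && !(p.any (fun kv => kv.1 == fk.1))) = true
  · rw [if_pos hcond, if_pos hcond]
    cases hg : (pvComputeBest p).get? fk.1 with
    | some pv =>
      rw [hg] at hsnd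
      simp only [Option.map_some] at hsnd
      rw [← hsnd]
    | none =>
      rw [hg] at hsnd
      simp only [Option.map_none] at hsnd
      rw [← hsnd]
  · rw [if_neg hcond, if_neg hcond]

-- ===== VERDICT (by name: the statement is the Claim_ definition above) =====
theorem normalize_values_py_spec : Claim_equal_normalize_values_py := by
  intro p al _ hpre
  unfold Spec_normalize_values_py
  rw [A_canon, B_canon p al hpre]
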